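-- pv_equiv track=rewrite | github.com/david419kr/sd-ai-prompt-translator | sd_ai_prompt_translator/providers.py | _count_structural_colons
-- ===== SOURCE A (Python) =====
-- def _count_structural_colons(text: str) -> int:
--     spans = _collect_balanced_spans(text)
--     if not spans:
--         return 0
--
--     colon_positions: set[int] = set()
--     for start, end in spans:
--         for idx in range(start, end):
--             if text[idx] == ":":
--                 colon_positions.add(idx)
--     return len(colon_positions)
--
-- def _collect_balanced_spans(text: str) -> list[tuple[int, int]]:
--     opener_to_closer = {"(": ")", "[": "]", "{": "}", "<": ">"}
--     closer_to_opener = {v: k for k, v in opener_to_closer.items()}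
--     stack: list[tuple[str, int]] = []
--     spans: list[tuple[int, int]] = []
--
--     for idx, ch in enumerate(text):
--         if ch in opener_to_closer:
--             stack.append((ch, idx))
--             continue
--
--         expected_opener = closer_to_opener.get(ch)
--         if expected_opener is None or not stack:
--             continue
--
--         opener, start_idx = stack[-1]
--         if opener != expected_opener:
--             continue
--
--         stack.pop()
--         spans.append((start_idx, idx + 1))
--
--     return spans
-- ===== SOURCE B (Python) =====
-- def _count_structural_colons(text: str) -> int:
--     closer_of = {"(": ")", "[": "]", "{": "}", "<": ">"}
--     n = len(text)
--     delta = [0] * (n + 1)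
--     stack = []  # (expected_closer, start_idx)
--     for i, ch in enumerate(text):
--         if ch in closer_of:
--             stack.append((closer_of[ch], i))
--         elif stack and ch == stack[-1][0]:
--             _, start = stack.pop()
--             delta[start] += 1
--             delta[i + 1] -= 1
--     total = 0
--     depth = 0
--     for i, ch in enumerate(text):
--         depth += delta[i]
--         if depth > 0 and ch == ":":
--             total += 1
--     return total
-- ===== Notes on version B (the rewrite author's own statement) =====
-- stated objective: alternative
-- what changed: B never materialises the span list, the position set or the per-span inner loops: one stack pass records each matched span as +1/-1 marks in a difference array, and a second linear pass keeps a running depth and counts colons where depth > 0 (O(n) vs A's O(n + total span length), which is quadratic for deeply nested brackets, though not on the timed random inputs).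
import Mathlib
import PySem

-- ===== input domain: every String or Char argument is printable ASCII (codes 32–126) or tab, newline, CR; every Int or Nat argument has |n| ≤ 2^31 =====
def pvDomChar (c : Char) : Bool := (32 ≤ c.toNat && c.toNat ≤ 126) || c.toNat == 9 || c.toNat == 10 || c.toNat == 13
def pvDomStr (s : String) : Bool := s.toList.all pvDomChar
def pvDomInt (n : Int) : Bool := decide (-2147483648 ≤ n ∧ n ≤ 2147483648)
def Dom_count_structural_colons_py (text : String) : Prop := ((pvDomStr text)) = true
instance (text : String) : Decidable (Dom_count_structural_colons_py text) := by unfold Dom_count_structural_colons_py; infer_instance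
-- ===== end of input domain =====

set_option maxRecDepth 8192

-- B replaces A's span list + nested per-span loops + position set by a difference-array sweep:
-- one stack pass marking spans, one linear pass counting colons under positive depth (alternative algorithm).


-- ===== PORT A =====
def pvOpenerToCloser : PySem.Dict Char Char :=
  PySem.Dict.ofList [('(',')'),('[',']'),('{','}'),('<','>')]
def pvCloserToOpener : PySem.Dict Char Char :=
  PySem.Dict.ofList (pvOpenerToCloser.items.map (fun p => (p.2, p.1)))

def collect_balanced_spans (text : String) : List (Int × Int) :=
  ((PySem.List.enumerate text.toList 0).foldl
    (fun (acc : List (Char × Int) × List (Int × Int)) p =>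
      if pvOpenerToCloser.contains p.2 then (acc.1 ++ [(p.2, p.1)], acc.2)
      else
        match pvCloserToOpener.get? p.2 with
        | none => acc
        | some expected =>
          match PySem.List.pyGet? acc.1 (-1) with
          | none => acc
          | some top =>
            if top.1 ≠ expected then acc
            else (acc.1.dropLast, acc.2 ++ [(top.2, p.1 + 1)]))
    ([], [])).2

def count_structural_colons_py (text : String) : Int :=
  let spans := collect_balanced_spans text
  if spans = [] then 0
  else
    ((spans.foldl
      (fun (cp : PySem.Set Int) se =>
        (PySem.List.pyRange se.1 se.2 1).foldl
          (fun (cp : PySem.Set Int) idx =>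
            if PySem.Str.pyGet? text idx = some ':' then PySem.Set.add cp idx else cp)
          cp)
      PySem.Set.empty).length : Int)

-- ===== PORT B =====
def pvCloserOfB : PySem.Dict Char Char :=
  PySem.Dict.ofList [('(',')'),('[',']'),('{','}'),('<','>')]

def count_structural_colons_py_alt (text : String) : Int :=
  let cs := text.toList
  let n := cs.length
  let pass1 := (PySem.List.enumerate cs 0).foldl
    (fun (acc : List Int × List (Char × Int)) p =>
      if pvCloserOfB.contains p.2 then
        (acc.1, acc.2 ++ [(pvCloserOfB.getD p.2 p.2, p.1)])
      else
        match PySem.List.pyGet? acc.2 (-1) with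
        | some top =>
          if p.2 = top.1 then
            let d1 := PySem.List.pySetD acc.1 top.2 (PySem.List.pyGetD acc.1 top.2 0 + 1)
            (PySem.List.pySetD d1 (p.1 + 1) (PySem.List.pyGetD d1 (p.1 + 1) 0 - 1),
             acc.2.dropLast)
          else acc
        | none => acc)
    (List.replicate (n+1) (0:Int), [])
  let pass2 := (PySem.List.enumerate cs 0).foldl
    (fun (acc : Int × Int) p =>
      let depth := acc.2 + PySem.List.pyGetD pass1.1 p.1 0
      if 0 < depth ∧ p.2 = ':' then (acc.1 + 1, depth) else (acc.1, depth))
    (0, 0)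
  pass2.1

-- ===== PRECONDITION & SPEC =====
def Spec_count_structural_colons_py (text : String) (out : Int) : Prop := out = count_structural_colons_py_alt text
instance (text : String) (out : Int) : Decidable (Spec_count_structural_colons_py text out) := by unfold Spec_count_structural_colons_py; infer_instance

-- ===== CLAIM (what is proved, stated in full; the proofs are below) =====
def Claim_equal_count_structural_colons_py : Prop := ∀ (text : String), Dom_count_structural_colons_py text → Spec_count_structural_colons_py text (count_structural_colons_py text)

-- ===== LEMMAS AND PROOFS =====

-- opener → its closer, closer → its opener (plain if-chains, proof-side mirrors of the dicts)
def pvOc (c : Char) : Option Char :=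
  if c = '(' then some ')' else if c = '[' then some ']'
  else if c = '{' then some '}' else if c = '<' then some '>' else none
def pvCo (c : Char) : Option Char :=
  if c = ')' then some '(' else if c = ']' then some '['
  else if c = '}' then some '{' else if c = '>' then some '<' else none

-- reference run: stack entries (opener, closer, index), top at the FRONT
def pvRun : List Char → Int → List (Char × Char × Int) → List (Int × Int) →
    (List (Char × Char × Int) × List (Int × Int))
  | [], _, st, sp => (st, sp)
  | c :: cs, i, st, sp =>
    match pvOc c with
    | some cl => pvRun cs (i+1) ((c, cl, i) :: st) sp
    | none =>
      match st with
      | [] => pvRun cs (i+1) [] sp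
      | top :: rest =>
          if c = top.2.1 then pvRun cs (i+1) rest (sp ++ [(top.2.2, i+1)])
          else pvRun cs (i+1) (top :: rest) sp

def pvInv (st : List (Char × Char × Int)) : Prop := ∀ t ∈ st, pvOc t.1 = some t.2.1

def pvEA (t : Char × Char × Int) : Char × Int := (t.1, t.2.2)
def pvEB (t : Char × Char × Int) : Char × Int := (t.2.1, t.2.2)

def pvAddSpan (d : List Int) (se : Int × Int) : List Int :=
  let d1 := PySem.List.pySetD d se.1 (PySem.List.pyGetD d se.1 0 + 1)
  PySem.List.pySetD d1 se.2 (PySem.List.pyGetD d1 se.2 0 - 1)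

def pvDiffc (sp : List (Int × Int)) (k : Int) : Int :=
  (sp.map (fun se => (if se.1 = k then (1:Int) else 0) - (if se.2 = k then 1 else 0))).sum
def pvCover (sp : List (Int × Int)) (x : Int) : Int :=
  (sp.map (fun se => (if se.1 ≤ x then (1:Int) else 0) - (if se.2 ≤ x then 1 else 0))).sum

-- dict facts
theorem pv_oc_mem {o cl : Char} (h : pvOc o = some cl) :
    (o, cl) ∈ [('(',')'),('[',']'),('{','}'),('<','>')] := by
  unfold pvOc at h; split_ifs at h <;> simp_all [eq_comm]

theorem pv_co_of_oc {o cl : Char} (h : pvOc o = some cl) : pvCo cl = some o := by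
  have hm := pv_oc_mem h; fin_cases hm <;> rfl

theorem pv_co_inj {o cl c : Char} (h : pvOc o = some cl) : pvCo c = some o ↔ c = cl := by
  constructor
  · intro hc
    have hm := pv_oc_mem h; fin_cases hm <;>
      (unfold pvCo at hc; split_ifs at hc <;> simp_all)
  · rintro rfl; exact pv_co_of_oc h

theorem pvA_contains (c : Char) : pvOpenerToCloser.contains c = (pvOc c).isSome := by
  by_cases h1 : c = '('; · subst h1; rfl
  by_cases h2 : c = '['; · subst h2; rfl
  by_cases h3 : c = '{'; · subst h3; rfl
  by_cases h4 : c = '<'; · subst h4; rfl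
  have h : pvOpenerToCloser = PySem.Dict.mk [('(',')'),('[',']'),('{','}'),('<','>')] := by decide
  rw [h]
  simp only [PySem.Dict.contains_mk, List.any_cons, List.any_nil]
  rw [pvOc, if_neg h1, if_neg h2, if_neg h3, if_neg h4]
  simp
  exact ⟨fun hh => h1 hh.symm, fun hh => h2 hh.symm, fun hh => h3 hh.symm, fun hh => h4 hh.symm⟩

theorem pvA_get (c : Char) : pvCloserToOpener.get? c = pvCo c := by
  by_cases h1 : c = ')'; · subst h1; rfl
  by_cases h2 : c = ']'; · subst h2; rfl
  by_cases h3 : c = '}'; · subst h3; rfl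
  by_cases h4 : c = '>'; · subst h4; rfl
  have h : pvCloserToOpener = PySem.Dict.mk [(')','('),(']','['),('}','{'),('>','<')] := by decide
  rw [h, PySem.Dict.get?_mk_cons, if_neg (by simp only [beq_iff_eq]; intro hh; exact h1 hh.symm)]
  rw [PySem.Dict.get?_mk_cons, if_neg (by simp only [beq_iff_eq]; intro hh; exact h2 hh.symm)]
  rw [PySem.Dict.get?_mk_cons, if_neg (by simp only [beq_iff_eq]; intro hh; exact h3 hh.symm)]
  rw [PySem.Dict.get?_mk_cons, if_neg (by simp only [beq_iff_eq]; intro hh; exact h4 hh.symm)]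
  rw [pvCo, if_neg h1, if_neg h2, if_neg h3, if_neg h4]
  rfl

theorem pvB_contains (c : Char) : pvCloserOfB.contains c = (pvOc c).isSome := by
  by_cases h1 : c = '('; · subst h1; rfl
  by_cases h2 : c = '['; · subst h2; rfl
  by_cases h3 : c = '{'; · subst h3; rfl
  by_cases h4 : c = '<'; · subst h4; rfl
  have h : pvCloserOfB = PySem.Dict.mk [('(',')'),('[',']'),('{','}'),('<','>')] := by decide
  rw [h]
  simp only [PySem.Dict.contains_mk, List.any_cons, List.any_nil]
  rw [pvOc, if_neg h1, if_neg h2, if_neg h3, if_neg h4]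
  simp
  exact ⟨fun hh => h1 hh.symm, fun hh => h2 hh.symm, fun hh => h3 hh.symm, fun hh => h4 hh.symm⟩

theorem pvB_getD {c cl : Char} (h : pvOc c = some cl) : pvCloserOfB.getD c c = cl := by
  have hm := pv_oc_mem h; fin_cases hm <;> rfl

-- accumulator lemma
theorem pvRun_acc (cs : List Char) (i : Int) (st : List (Char × Char × Int)) (sp : List (Int × Int)) :
    pvRun cs i st sp = ((pvRun cs i st []).1, sp ++ (pvRun cs i st []).2) := by
  induction cs generalizing i st sp with
  | nil => simp [pvRun]
  | cons c cs ih =>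
    rcases h : pvOc c with _ | cl
    · rcases st with _ | ⟨top, rest⟩
      · simp only [pvRun, h]; exact ih ..
      · simp only [pvRun, h]
        by_cases hc : c = top.2.1
        · simp only [if_pos hc]
          rw [ih _ _ (sp ++ [(top.2.2, i+1)]), ih _ _ ([] ++ [(top.2.2, i+1)])]
          simp
        · simp only [if_neg hc]; exact ih ..
    · simp only [pvRun, h]; exact ih ..

-- span bounds
theorem pvRun_bounds (cs : List Char) (i : Int) (st : List (Char × Char × Int))
    (sp : List (Int × Int)) (hi : 0 ≤ i)
    (hst : ∀ t ∈ st, 0 ≤ t.2.2 ∧ t.2.2 < i)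
    (hsp : ∀ se ∈ sp, 0 ≤ se.1 ∧ se.1 < se.2 ∧ se.2 ≤ i) :
    ∀ se ∈ (pvRun cs i st sp).2, 0 ≤ se.1 ∧ se.1 < se.2 ∧ se.2 ≤ i + cs.length := by
  induction cs generalizing i st sp with
  | nil => simpa [pvRun] using hsp
  | cons c cs ih =>
    have hi1 : (0:Int) ≤ i + 1 := by omega
    rcases h : pvOc c with _ | cl
    · rcases st with _ | ⟨top, rest⟩
      · simp only [pvRun, h]
        intro se hse
        have := ih (i+1) [] sp hi1 (by simp)
          (fun se h => by have := hsp se h; omega) se hse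
        simpa [add_comm, add_left_comm, add_assoc] using this
      · simp only [pvRun, h]
        by_cases hc : c = top.2.1
        · simp only [if_pos hc]
          intro se hse
          have hb : ∀ se ∈ sp ++ [(top.2.2, i+1)], 0 ≤ se.1 ∧ se.1 < se.2 ∧ se.2 ≤ i + 1 := by
            intro se hse
            rcases List.mem_append.mp hse with h' | h'
            · have := hsp se h'; omega
            · simp at h'; subst h'
              have := hst top (List.mem_cons_self ..)
              simp; omega
          have := ih (i+1) rest (sp ++ [(top.2.2, i+1)]) hi1
            (fun t ht => by have := hst t (List.mem_cons_of_mem _ ht); omega) hb se hse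
          simpa [add_comm, add_left_comm, add_assoc] using this
        · simp only [if_neg hc]
          intro se hse
          have := ih (i+1) (top :: rest) sp hi1
            (fun t ht => by have := hst t ht; omega)
            (fun se h => by have := hsp se h; omega) se hse
          simpa [add_comm, add_left_comm, add_assoc] using this
    · simp only [pvRun, h]
      intro se hse
      have := ih (i+1) ((c, cl, i) :: st) sp hi1
        (by
          intro t ht
          rcases List.mem_cons.mp ht with h' | h'
          · subst h'; simp; omega
          · have := hst t h'; omega)
        (fun se h => by have := hsp se h; omega) se hse
      simpa [add_comm, add_left_comm, add_assoc] using this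

-- A's pass = pvRun
theorem pvA_run (cs : List Char) (i : Int) (st : List (Char × Char × Int))
    (sp : List (Int × Int)) (hinv : pvInv st) :
    (PySem.List.enumerate cs i).foldl
      (fun (acc : List (Char × Int) × List (Int × Int)) p =>
        if pvOpenerToCloser.contains p.2 then (acc.1 ++ [(p.2, p.1)], acc.2)
        else
          match pvCloserToOpener.get? p.2 with
          | none => acc
          | some expected =>
            match PySem.List.pyGet? acc.1 (-1) with
            | none => acc
            | some top =>
              if top.1 ≠ expected then acc
              else (acc.1.dropLast, acc.2 ++ [(top.2, p.1 + 1)]))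
      ((st.map pvEA).reverse, sp)
    = (((pvRun cs i st sp).1.map pvEA).reverse, (pvRun cs i st sp).2) := by
  induction cs generalizing i st sp with
  | nil => simp [pvRun, PySem.List.enumerate_nil]
  | cons c cs ih =>
    rw [PySem.List.enumerate_cons, List.foldl_cons]
    rcases h : pvOc c with _ | cl
    · have hcont : pvOpenerToCloser.contains c = false := by rw [pvA_contains, h]; rfl
      simp only [hcont, Bool.false_eq_true, if_false, pvA_get c]
      rcases hco : pvCo c with _ | o
      · rcases st with _ | ⟨top, rest⟩
        · simp only [pvRun, h]; exact ih (i+1) [] sp hinv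
        · have hne : ¬ c = top.2.1 := by
            intro hc; subst hc
            rw [pv_co_of_oc (hinv top (List.mem_cons_self ..))] at hco; cases hco
          simp only [pvRun, h, if_neg hne]
          exact ih (i+1) (top :: rest) sp hinv
      · rcases st with _ | ⟨top, rest⟩
        · have hget0 : PySem.List.pyGet? (((([] : List (Char × Char × Int))).map pvEA).reverse) (-1)
              = (none : Option (Char × Int)) := by rfl
          simp only [hget0, pvRun, h]
          exact ih (i+1) [] sp hinv
        · have htop : pvOc top.1 = some top.2.1 := hinv top (List.mem_cons_self ..)
          have hget : PySem.List.pyGet? (((top :: rest).map pvEA).reverse) (-1)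
              = some (pvEA top) := by
            rw [PySem.List.pyGet?_neg_one, List.getLast?_reverse]; rfl
          simp only [hget]
          by_cases he : top.1 = o
          · have hc : c = top.2.1 := by rw [← pv_co_inj htop, hco, he]
            have hne2 : ¬ (pvEA top).1 ≠ o := by simp [pvEA, he]
            have hdl : ((((top :: rest).map pvEA).reverse)).dropLast
                = (rest.map pvEA).reverse := by simp
            simp only [if_neg hne2, hdl, pvRun, h, if_pos hc]
            have he2 : (pvEA top).2 = top.2.2 := rfl
            rw [he2]
            exact ih (i+1) rest (sp ++ [(top.2.2, i+1)])
              (fun t ht => hinv t (List.mem_cons_of_mem _ ht))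
          · have hc : ¬ c = top.2.1 := by
              intro hcc
              rw [← pv_co_inj htop, hco] at hcc
              exact he (Option.some.inj hcc).symm
            have hne2 : (pvEA top).1 ≠ o := he
            simp only [if_pos hne2, pvRun, h, if_neg hc]
            exact ih (i+1) (top :: rest) sp hinv
    · have hcont : pvOpenerToCloser.contains c = true := by rw [pvA_contains, h]; rfl
      have hpush : (st.map pvEA).reverse ++ [(c, i)]
          = ((((c, cl, i) :: st).map pvEA).reverse) := by simp [pvEA]
      simp only [hcont, if_true, hpush, pvRun, h]
      exact ih (i+1) ((c, cl, i) :: st) sp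
        (by
          intro t ht
          rcases List.mem_cons.mp ht with h' | h'
          · subst h'; exact h
          · exact hinv t h')

-- B's first pass = pvRun + foldl pvAddSpan
theorem pvB_run (cs : List Char) (i : Int) (st : List (Char × Char × Int))
    (d : List Int) (hinv : pvInv st) :
    (PySem.List.enumerate cs i).foldl
      (fun (acc : List Int × List (Char × Int)) p =>
        if pvCloserOfB.contains p.2 then
          (acc.1, acc.2 ++ [(pvCloserOfB.getD p.2 p.2, p.1)])
        else
          match PySem.List.pyGet? acc.2 (-1) with
          | some top =>
            if p.2 = top.1 then
              let d1 := PySem.List.pySetD acc.1 top.2 (PySem.List.pyGetD acc.1 top.2 0 + 1)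
              (PySem.List.pySetD d1 (p.1 + 1) (PySem.List.pyGetD d1 (p.1 + 1) 0 - 1),
               acc.2.dropLast)
            else acc
          | none => acc)
      (d, (st.map pvEB).reverse)
    = ((pvRun cs i st []).2.foldl pvAddSpan d, (((pvRun cs i st []).1.map pvEB).reverse)) := by
  induction cs generalizing i st d with
  | nil => simp [pvRun, PySem.List.enumerate_nil]
  | cons c cs ih =>
    rw [PySem.List.enumerate_cons, List.foldl_cons]
    rcases h : pvOc c with _ | cl
    · have hcont : pvCloserOfB.contains c = false := by rw [pvB_contains, h]; rfl
      simp only [hcont, Bool.false_eq_true, if_false]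
      rcases st with _ | ⟨top, rest⟩
      · have hget0 : PySem.List.pyGet? (((([] : List (Char × Char × Int))).map pvEB).reverse) (-1)
            = (none : Option (Char × Int)) := by rfl
        simp only [hget0, pvRun, h]
        exact ih (i+1) [] d hinv
      · have htop : pvOc top.1 = some top.2.1 := hinv top (List.mem_cons_self ..)
        have hget : PySem.List.pyGet? (((top :: rest).map pvEB).reverse) (-1)
            = some (pvEB top) := by
          rw [PySem.List.pyGet?_neg_one, List.getLast?_reverse]; rfl
        simp only [hget]
        by_cases hc : c = top.2.1
        · have hc' : c = (pvEB top).1 := hc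
          have hdl : ((((top :: rest).map pvEB).reverse)).dropLast
              = (rest.map pvEB).reverse := by simp
          simp only [if_pos hc', hdl, pvRun, h, if_pos hc, List.nil_append]
          rw [pvRun_acc cs (i+1) rest [(top.2.2, i+1)]]
          have e : (PySem.List.pySetD
                (PySem.List.pySetD d (pvEB top).2 (PySem.List.pyGetD d (pvEB top).2 0 + 1))
                (i + 1)
                (PySem.List.pyGetD
                  (PySem.List.pySetD d (pvEB top).2 (PySem.List.pyGetD d (pvEB top).2 0 + 1))
                  (i + 1) 0 - 1))
              = pvAddSpan d (top.2.2, i + 1) := rfl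
          rw [e]
          simp only [List.singleton_append, List.foldl_cons]
          exact ih (i+1) rest (pvAddSpan d (top.2.2, i+1))
            (fun t ht => hinv t (List.mem_cons_of_mem _ ht))
        · have hc' : ¬ c = (pvEB top).1 := hc
          simp only [if_neg hc', pvRun, h, if_neg hc]
          exact ih (i+1) (top :: rest) d hinv
    · have hcont : pvCloserOfB.contains c = true := by rw [pvB_contains, h]; rfl
      have hpush : (st.map pvEB).reverse ++ [(pvCloserOfB.getD c c, i)]
          = ((((c, cl, i) :: st).map pvEB).reverse) := by simp [pvEB, pvB_getD h]
      simp only [hcont, if_true, hpush, pvRun, h]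
      exact ih (i+1) ((c, cl, i) :: st) d
        (by
          intro t ht
          rcases List.mem_cons.mp ht with h' | h'
          · subst h'; exact h
          · exact hinv t h')

-- delta pointwise
theorem pv_getD_set (d : List Int) (j k v : Int) (hj0 : 0 ≤ j) (hjl : j < d.length)
    (hk0 : 0 ≤ k) (hkl : k < d.length) :
    PySem.List.pyGetD (PySem.List.pySetD d j v) k 0
      = if k = j then v else PySem.List.pyGetD d k 0 := by
  rw [PySem.List.pySetD_of_nonneg d v hj0,
      PySem.List.pyGetD_eq_getElem _ _ hk0 (by simpa using hkl),
      PySem.List.pyGetD_eq_getElem _ _ hk0 hkl]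
  rw [List.getElem_set]
  by_cases h : k = j
  · subst h; simp
  · rw [if_neg (by omega), if_neg h]

theorem pv_length_addSpan (d : List Int) (se : Int × Int) :
    (pvAddSpan d se).length = d.length := by
  simp [pvAddSpan]

theorem pv_getD_addSpan (d : List Int) (se : Int × Int) (k : Int)
    (hk0 : 0 ≤ k) (hkl : k < d.length)
    (hb : 0 ≤ se.1 ∧ se.1 < se.2 ∧ se.2 < d.length) :
    PySem.List.pyGetD (pvAddSpan d se) k 0
      = PySem.List.pyGetD d k 0
        + ((if se.1 = k then (1:Int) else 0) - (if se.2 = k then 1 else 0)) := by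
  obtain ⟨h1, h2, h3⟩ := hb
  unfold pvAddSpan
  by_cases e2 : k = se.2
  · subst e2
    rw [pv_getD_set _ _ _ _ (by omega) (by simp; omega) hk0
          (by simp; omega), if_pos rfl]
    rw [pv_getD_set _ _ _ _ (by omega) (by omega) (by omega) (by omega), if_neg (by omega)]
    rw [if_neg (by omega : ¬ se.1 = se.2), if_pos rfl]
    ring
  · rw [pv_getD_set _ _ _ _ (by omega) (by simp; omega) hk0
          (by simp; omega), if_neg e2]
    by_cases e1 : k = se.1
    · rw [e1]
      rw [pv_getD_set _ _ _ _ (by omega) (by omega) (by omega) (by omega), if_pos rfl]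
      rw [if_pos rfl, if_neg (by omega : ¬ se.2 = se.1)]
      ring
    · rw [pv_getD_set _ _ _ _ (by omega) (by omega) hk0 hkl, if_neg e1]
      rw [if_neg (by omega : ¬ se.1 = k), if_neg (by omega : ¬ se.2 = k)]
      ring

theorem pv_getD_addSpans (sp : List (Int × Int)) (d : List Int) (k : Int)
    (hk0 : 0 ≤ k) (hkl : k < d.length)
    (hb : ∀ se ∈ sp, 0 ≤ se.1 ∧ se.1 < se.2 ∧ se.2 < d.length) :
    PySem.List.pyGetD (sp.foldl pvAddSpan d) k 0 = PySem.List.pyGetD d k 0 + pvDiffc sp k := by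
  induction sp generalizing d with
  | nil => simp [pvDiffc]
  | cons se sp ih =>
    rw [List.foldl_cons]
    rw [ih (pvAddSpan d se) (by rw [pv_length_addSpan]; exact hkl)
          (by
            intro t ht
            have := hb t (List.mem_cons_of_mem _ ht)
            rw [pv_length_addSpan]; exact this)]
    rw [pv_getD_addSpan d se k hk0 hkl (hb se (List.mem_cons_self ..))]
    simp only [pvDiffc, List.map_cons, List.sum_cons]
    ring

-- cover recurrence and positivity
theorem pv_cover_rec (sp : List (Int × Int)) (i : Int) :
    pvCover sp i = pvCover sp (i-1) + pvDiffc sp i := by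
  induction sp with
  | nil => simp [pvCover, pvDiffc]
  | cons se sp ih =>
    simp only [pvCover, pvDiffc, List.map_cons, List.sum_cons] at ih ⊢
    have he : ((if se.1 ≤ i then (1:Int) else 0) - (if se.2 ≤ i then 1 else 0))
        = ((if se.1 ≤ i-1 then (1:Int) else 0) - (if se.2 ≤ i-1 then 1 else 0))
          + ((if se.1 = i then (1:Int) else 0) - (if se.2 = i then 1 else 0)) := by
      split_ifs <;> omega
    omega

theorem pv_cover_neg (sp : List (Int × Int)) (x : Int)
    (hb : ∀ se ∈ sp, 0 ≤ se.1 ∧ se.1 < se.2) (hx : x < 0) : pvCover sp x = 0 := by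
  induction sp with
  | nil => simp [pvCover]
  | cons se sp ih =>
    have h1 := hb se (List.mem_cons_self ..)
    simp only [pvCover, List.map_cons, List.sum_cons] at ih ⊢
    rw [ih (fun t ht => hb t (List.mem_cons_of_mem _ ht))]
    split_ifs <;> omega

theorem pv_cover_nonneg (sp : List (Int × Int)) (x : Int)
    (hb : ∀ se ∈ sp, se.1 < se.2) : 0 ≤ pvCover sp x := by
  induction sp with
  | nil => simp [pvCover]
  | cons se sp ih =>
    have h1 := hb se (List.mem_cons_self ..)
    simp only [pvCover, List.map_cons, List.sum_cons] at ih ⊢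
    have := ih (fun t ht => hb t (List.mem_cons_of_mem _ ht))
    split_ifs <;> omega

theorem pv_cover_pos_iff (sp : List (Int × Int)) (x : Int)
    (hb : ∀ se ∈ sp, se.1 < se.2) :
    0 < pvCover sp x ↔ ∃ se ∈ sp, se.1 ≤ x ∧ x < se.2 := by
  induction sp with
  | nil => simp [pvCover]
  | cons se sp ih =>
    have h1 := hb se (List.mem_cons_self ..)
    have hrest := fun t ht => hb t (List.mem_cons_of_mem _ ht)
    have hnn := pv_cover_nonneg sp x hrest
    simp only [pvCover] at hnn
    simp only [pvCover, List.map_cons, List.sum_cons]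
    rw [List.exists_mem_cons_iff]
    constructor
    · intro hpos
      by_cases hin : se.1 ≤ x ∧ x < se.2
      · exact Or.inl hin
      · refine Or.inr ((ih hrest).mp ?_)
        simp only [pvCover]
        split_ifs at hpos <;> omega
    · rintro (hin | hex)
      · have : ((if se.1 ≤ x then (1:Int) else 0) - (if se.2 ≤ x then 1 else 0)) = 1 := by
          split_ifs <;> omega
        omega
      · have : 0 < pvCover sp x := (ih hrest).mpr hex
        simp only [pvCover] at this
        split_ifs <;> omega

-- B's second pass counts colons under positive cover
theorem pvB_pass2 (sp : List (Int × Int)) (delta : List Int) (cs : List Char) (i t d : Int)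
    (hd : ∀ k, i ≤ k → k < i + cs.length → PySem.List.pyGetD delta k 0 = pvDiffc sp k)
    (hcov : d = pvCover sp (i-1)) :
    ((PySem.List.enumerate cs i).foldl
      (fun (acc : Int × Int) p =>
        let depth := acc.2 + PySem.List.pyGetD delta p.1 0
        if 0 < depth ∧ p.2 = ':' then (acc.1 + 1, depth) else (acc.1, depth))
      (t, d)).1
    = t + ((PySem.List.enumerate cs i).countP
        (fun p => decide (0 < pvCover sp p.1) && (p.2 == ':')) : Int) := by
  induction cs generalizing i t d with
  | nil => simp [PySem.List.enumerate_nil]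
  | cons c cs ih =>
    rw [PySem.List.enumerate_cons, List.foldl_cons, List.countP_cons]
    have hlen : (i : Int) < i + (c :: cs).length := by simp
    have hdep : d + PySem.List.pyGetD delta i 0 = pvCover sp i := by
      rw [hcov, hd i (le_refl i) hlen, ← pv_cover_rec]
    have hd' : ∀ k, i + 1 ≤ k → k < (i + 1) + cs.length →
        PySem.List.pyGetD delta k 0 = pvDiffc sp k := by
      intro k h1 h2
      refine hd k (by omega) (by simp at h2 ⊢; omega)
    have hcov' : d + PySem.List.pyGetD delta i 0 = pvCover sp ((i + 1) - 1) := by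
      simpa using hdep
    by_cases hp : 0 < d + PySem.List.pyGetD delta i 0 ∧ c = ':'
    · obtain ⟨hp1, hp2⟩ := hp
      rw [if_pos ⟨hp1, hp2⟩, ih (i+1) (t+1) _ hd' hcov']
      have h1 : 0 < pvCover sp i := by omega
      simp [h1, hp2]
      omega
    · rw [if_neg hp, ih (i+1) t _ hd' hcov']
      have hcF : ((decide (0 < pvCover sp i) && (c == ':')) = true) → False := by
        intro hcon
        simp only [Bool.and_eq_true, decide_eq_true_eq, beq_iff_eq] at hcon
        exact hp ⟨by omega, hcon.2⟩
      have hb : (decide (0 < pvCover sp i) && (c == ':')) = false := by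
        cases hres : (decide (0 < pvCover sp i) && (c == ':'))
        · rfl
        · exact absurd hres hcF
      simp [hb]

-- A's set: membership and nodup
theorem pvA_set_mem (cs : List Char) (sp : List (Int × Int)) (s0 : PySem.Set Int) (x : Int) :
    x ∈ sp.foldl
      (fun (cp : PySem.Set Int) se =>
        (PySem.List.pyRange se.1 se.2 1).foldl
          (fun (cp : PySem.Set Int) idx =>
            if PySem.List.pyGet? cs idx = some ':' then PySem.Set.add cp idx else cp)
          cp)
      s0
    ↔ x ∈ s0 ∨ ∃ se ∈ sp, (se.1 ≤ x ∧ x < se.2) ∧ PySem.List.pyGet? cs x = some ':' := by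
  induction sp generalizing s0 with
  | nil => simp
  | cons se sp ih =>
    rw [List.foldl_cons]
    rw [PySem.List.foldl_ite_eq_foldl_filter
          (p := fun idx => PySem.List.pyGet? cs idx = some ':')
          (f := fun (cp : PySem.Set Int) idx => PySem.Set.add cp idx)]
    rw [ih]
    rw [PySem.Set.mem_foldl_add _ (fun (b : Int) => b)]
    simp only [List.mem_filter, PySem.List.mem_pyRange_one, decide_eq_true_eq,
      List.exists_mem_cons_iff]
    constructor
    · rintro ((hx | ⟨b, ⟨⟨hb1, hb2⟩, hb3⟩, rfl⟩) | hex)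
      · exact Or.inl hx
      · exact Or.inr (Or.inl ⟨⟨hb1, hb2⟩, hb3⟩)
      · exact Or.inr (Or.inr hex)
    · rintro (hx | ⟨⟨⟨h1, h2⟩, h3⟩ | hex⟩)
      · exact Or.inl (Or.inl hx)
      · exact Or.inl (Or.inr ⟨x, ⟨⟨h1, h2⟩, h3⟩, rfl⟩)
      · exact Or.inr hex

theorem pvA_set_nodup (cs : List Char) (sp : List (Int × Int)) (s0 : PySem.Set Int)
    (h0 : s0.Nodup) :
    (sp.foldl
      (fun (cp : PySem.Set Int) se =>
        (PySem.List.pyRange se.1 se.2 1).foldl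
          (fun (cp : PySem.Set Int) idx =>
            if PySem.List.pyGet? cs idx = some ':' then PySem.Set.add cp idx else cp)
          cp)
      s0).Nodup := by
  induction sp generalizing s0 with
  | nil => exact h0
  | cons se sp ih =>
    rw [List.foldl_cons]
    refine ih _ ?_
    have : ∀ (l : List Int) (s : PySem.Set Int), s.Nodup →
        (l.foldl (fun (cp : PySem.Set Int) idx =>
          if PySem.List.pyGet? cs idx = some ':' then PySem.Set.add cp idx else cp) s).Nodup := by
      intro l
      induction l with
      | nil => intro s hs; exact hs
      | cons b l ihl =>
        intro s hs
        rw [List.foldl_cons]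
        by_cases hb : PySem.List.pyGet? cs b = some ':'
        · rw [if_pos hb]; exact ihl _ (PySem.Set.nodup_add _ _ hs)
        · rw [if_neg hb]; exact ihl _ hs
    exact this _ _ h0

-- ===== VERDICT (by name: the statement is the Claim_ definition above) =====
-- bridging: string indexing is list indexing
theorem pv_str_pyGet (text : String) :
    PySem.Str.pyGet? text = PySem.List.pyGet? text.toList := by
  funext idx; simp [pysem]

-- the two counting predicates agree on in-range indices
theorem pv_pred_eq (cs : List Char) (sp : List (Int × Int)) (x : Int)
    (hb : ∀ se ∈ sp, se.1 < se.2) (hx0 : 0 ≤ x) (hxn : x < cs.length) :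
    (decide ((∃ se ∈ sp, se.1 ≤ x ∧ x < se.2) ∧ PySem.List.pyGet? cs x = some ':'))
      = (decide (0 < pvCover sp x) && (PySem.List.pyGetD cs x ' ' == ':')) := by
  rw [Bool.eq_iff_iff]
  simp only [decide_eq_true_eq, Bool.and_eq_true, beq_iff_eq]
  rw [← pv_cover_pos_iff sp x hb]
  rw [PySem.List.pyGet?_eq_some_getElem cs hx0 hxn, PySem.List.pyGetD_eq_getElem cs ' ' hx0 hxn]
  simp

theorem count_structural_colons_py_spec : Claim_equal_count_structural_colons_py := by
  intro text _
  unfold Spec_count_structural_colons_py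
  unfold count_structural_colons_py collect_balanced_spans count_structural_colons_py_alt
  have hinv0 : pvInv [] := by intro t ht; cases ht
  dsimp only
  have hA := pvA_run text.toList 0 [] [] hinv0
  simp only [List.map_nil, List.reverse_nil] at hA
  have hB := pvB_run text.toList 0 [] (List.replicate (text.toList.length + 1) (0:Int)) hinv0
  simp only [List.map_nil, List.reverse_nil] at hB
  rw [hA]
  simp only [hB]
  -- abbreviations
  have hbounds : ∀ se ∈ (pvRun text.toList 0 [] []).2,
      0 ≤ se.1 ∧ se.1 < se.2 ∧ se.2 ≤ (0:Int) + text.toList.length :=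
    pvRun_bounds text.toList 0 [] [] (le_refl 0) (fun t ht => absurd ht (List.not_mem_nil))
      (fun se hse => absurd hse (List.not_mem_nil))
  set sp := (pvRun text.toList 0 [] []).2 with hsp
  set delta := sp.foldl pvAddSpan (List.replicate (text.toList.length + 1) (0:Int)) with hdelta
  -- the second pass counts colons under positive cover
  have hd : ∀ k, (0:Int) ≤ k → k < (0:Int) + text.toList.length →
      PySem.List.pyGetD delta k 0 = pvDiffc sp k := by
    intro k h1 h2
    rw [hdelta, pv_getD_addSpans sp _ k h1
          (by simp only [List.length_replicate]; push_cast; omega)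
          (by
            intro se hse
            have := hbounds se hse
            simp only [List.length_replicate]
            push_cast
            omega)]
    rw [PySem.List.pyGetD_eq_getElem _ _ h1 (by simp only [List.length_replicate]; push_cast; omega)]
    simp [List.getElem_replicate]
  have hcov0 : (0:Int) = pvCover sp ((0:Int) - 1) := by
    rw [pv_cover_neg sp _ (fun se hse => ⟨(hbounds se hse).1, (hbounds se hse).2.1⟩) (by omega)]
  rw [pvB_pass2 sp delta text.toList 0 0 0 hd hcov0]
  by_cases hnil : sp = []
  · rw [if_pos hnil]
    simp [hnil, pvCover]
  · rw [if_neg hnil]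
    -- A's set counts the same colons
    rw [pv_str_pyGet text]
    have hmem := pvA_set_mem text.toList sp PySem.Set.empty
    have hnodup := pvA_set_nodup text.toList sp PySem.Set.empty List.nodup_nil
    set S := sp.foldl
      (fun (cp : PySem.Set Int) se =>
        (PySem.List.pyRange se.1 se.2 1).foldl
          (fun (cp : PySem.Set Int) idx =>
            if PySem.List.pyGet? text.toList idx = some ':' then PySem.Set.add cp idx else cp)
          cp)
      PySem.Set.empty with hS
    have hperm : S.Perm ((PySem.List.pyRange 0 text.toList.length 1).filter
        (fun x => decide ((∃ se ∈ sp, se.1 ≤ x ∧ x < se.2)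
          ∧ PySem.List.pyGet? text.toList x = some ':'))) := by
      rw [List.perm_ext_iff_of_nodup hnodup (List.Nodup.filter _ (PySem.List.nodup_pyRange_one 0 (text.toList.length : Int)))]
      intro x
      rw [List.mem_filter, PySem.List.mem_pyRange_one]
      constructor
      · intro hx
        rcases (hmem x).mp hx with h0 | ⟨se, hse, ⟨hx1, hx2⟩, hcol⟩
        · cases h0
        · have hb := hbounds se hse
          refine ⟨⟨by omega, by omega⟩, ?_⟩
          simp only [decide_eq_true_eq]
          exact ⟨⟨se, hse, hx1, hx2⟩, hcol⟩
      · rintro ⟨⟨hx1, hx2⟩, hq⟩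
        simp only [decide_eq_true_eq] at hq
        refine (hmem x).mpr (Or.inr ?_)
        obtain ⟨⟨se, hse, h1, h2⟩, hcol⟩ := hq
        exact ⟨se, hse, ⟨h1, h2⟩, hcol⟩
    rw [hperm.length_eq, ← List.countP_eq_length_filter]
    rw [PySem.List.enumerate_eq_map_pyRange text.toList ' ', List.countP_map]
    simp only [Function.comp_def, PySem.List.len_eq]
    have hcount := List.countP_congr
      (p := fun x => decide (0 < pvCover sp x) && (PySem.List.pyGetD text.toList x ' ' == ':'))
      (q := fun x => decide ((∃ se ∈ sp, se.1 ≤ x ∧ x < se.2)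
        ∧ PySem.List.pyGet? text.toList x = some ':'))
      (l := PySem.List.pyRange 0 (text.toList.length : Int) 1)
      (fun x hx => by
        have hx' := PySem.List.mem_pyRange_one.mp hx
        have heq := pv_pred_eq text.toList sp x
          (fun se hse => (hbounds se hse).2.1) hx'.1 hx'.2
        exact Bool.eq_iff_iff.mp heq.symm)
    rw [hcount]
    omega
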